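-- pv_equiv track=rewrite | github.com/worckyky/social-parcer | backend/main.py | is_vk_url
-- ===== SOURCE A (Python) =====
-- def is_vk_url(url: str) -> bool:
--     """Проверяет, является ли URL ссылкой на VK Video"""
--     url_lower = url.lower()
--     return any(domain in url_lower for domain in [
--         "vk.com/video",
--         "vk.com/clip",
--         "vk.ru/video",
--         "vk.ru/clip",
--         "m.vk.com/video",
--         "m.vk.ru/video"
--     ])
-- ===== SOURCE B (Python) =====
-- def is_vk_url(url: str) -> bool:
--     """Single left-to-right scan: at each "vk." anchor check domain and path pieces."""
--     s = url.lower()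
--     for i in range(len(s)):
--         if s.startswith("vk.", i):
--             if s.startswith("com/", i + 3):
--                 j = i + 7
--             elif s.startswith("ru/", i + 3):
--                 j = i + 6
--             else:
--                 continue
--             if s.startswith("video", j) or s.startswith("clip", j):
--                 return True
--     return False
-- ===== Notes on version B (the rewrite author's own statement) =====
-- stated objective: alternative
-- what changed: B replaces the six independent substring-containment scans by one hand-rolled left-to-right scan that anchors on "vk." and then checks the domain (com/ or ru/) and the path piece (video or clip); the two redundant m.* literals disappear.
import Mathlib
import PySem

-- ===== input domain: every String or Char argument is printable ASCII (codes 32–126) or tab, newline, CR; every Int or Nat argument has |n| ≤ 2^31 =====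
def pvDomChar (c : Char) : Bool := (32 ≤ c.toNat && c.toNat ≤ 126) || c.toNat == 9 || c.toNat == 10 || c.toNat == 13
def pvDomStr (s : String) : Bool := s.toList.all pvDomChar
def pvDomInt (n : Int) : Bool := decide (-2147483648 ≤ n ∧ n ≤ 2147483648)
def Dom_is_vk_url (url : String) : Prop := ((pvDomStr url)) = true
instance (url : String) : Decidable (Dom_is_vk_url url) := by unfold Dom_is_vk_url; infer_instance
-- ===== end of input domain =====

-- B replaces A's six substring scans by one left-to-right scan anchored on "vk."; alternative decomposition, not claimed faster.

-- ===== PORT A =====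
def is_vk_url (url : String) : Bool :=
  let url_lower := PySem.Str.lower url
  ["vk.com/video", "vk.com/clip", "vk.ru/video", "vk.ru/clip",
   "m.vk.com/video", "m.vk.ru/video"].any
    (fun domain => PySem.Str.isIn domain url_lower)

-- ===== PORT B =====
-- the char-list forms of B's literals ("vk.", "com/", "ru/", "video", "clip")
def pvVK : List Char := ['v', 'k', '.']
def pvCOM : List Char := ['c', 'o', 'm', '/']
def pvRU : List Char := ['r', 'u', '/']
def pvVIDEO : List Char := ['v', 'i', 'd', 'e', 'o']
def pvCLIP : List Char := ['c', 'l', 'i', 'p']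

-- body of B's loop at one index: s.startswith checks via prefix of the dropped suffix
def pvHitAt (s : List Char) : Bool :=
  if pvVK.isPrefixOf s then
    let r := s.drop 3
    if pvCOM.isPrefixOf r then
      let t := r.drop 4
      pvVIDEO.isPrefixOf t || pvCLIP.isPrefixOf t
    else if pvRU.isPrefixOf r then
      let t := r.drop 3
      pvVIDEO.isPrefixOf t || pvCLIP.isPrefixOf t
    else false
  else false

-- B's 'for i in range(len(s))' loop with early return
def pvScan : List Char → Bool
  | [] => false
  | c :: rest => pvHitAt (c :: rest) || pvScan rest

def is_vk_url_alt (url : String) : Bool :=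
  pvScan (PySem.Str.lower url).toList

-- ===== PRECONDITION & SPEC =====
def Spec_is_vk_url (url : String) (out : Bool) : Prop := out = is_vk_url_alt url
instance (url : String) (out : Bool) : Decidable (Spec_is_vk_url url out) := by unfold Spec_is_vk_url; infer_instance

-- ===== CLAIM (what is proved, stated in full; the proofs are below) =====
def Claim_equal_is_vk_url : Prop := ∀ (url : String), Dom_is_vk_url url → Spec_is_vk_url url (is_vk_url url)

-- ===== LEMMAS AND PROOFS =====

lemma pv_prefix_append_iff (a b s : List Char) :
    (a ++ b) <+: s ↔ a <+: s ∧ b <+: s.drop a.length := by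
  constructor
  · rintro ⟨t, rfl⟩
    refine ⟨⟨b ++ t, by simp⟩, ?_⟩
    rw [List.append_assoc, List.drop_left]
    exact ⟨t, rfl⟩
  · rintro ⟨⟨u, rfl⟩, hb⟩
    rw [List.drop_left] at hb
    obtain ⟨v, rfl⟩ := hb
    exact ⟨v, by simp⟩

-- pvHitAt recognises exactly the four non-redundant literals as prefixes
lemma pvHitAt_iff (s : List Char) : pvHitAt s = true ↔
    (pvVK ++ pvCOM ++ pvVIDEO) <+: s ∨ (pvVK ++ pvCOM ++ pvCLIP) <+: s ∨
    (pvVK ++ pvRU ++ pvVIDEO) <+: s ∨ (pvVK ++ pvRU ++ pvCLIP) <+: s := by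
  have hvk : pvVK.length = 3 := rfl
  have hcom : pvCOM.length = 4 := rfl
  have hru : pvRU.length = 3 := rfl
  have hcr : ∀ r : List Char, pvCOM <+: r → ¬ pvRU <+: r := by
    rintro r ⟨t, rfl⟩ h
    simp [pvCOM, pvRU, List.cons_prefix_cons] at h
  simp only [List.append_assoc, pv_prefix_append_iff, hvk, hcom, hru, pvHitAt,
    List.isPrefixOf_iff_prefix]
  split_ifs with h1 h2 h3
  · simp [h1, h2, hcr _ h2, Bool.or_eq_true, List.isPrefixOf_iff_prefix]
  · simp [h1, h2, h3, Bool.or_eq_true, List.isPrefixOf_iff_prefix]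
  · simp [h1, h2, h3]
  · simp [h1]

lemma pvScan_iff (cs : List Char) : pvScan cs = true ↔ ∃ j, pvHitAt (cs.drop j) = true := by
  induction cs with
  | nil =>
    simp [pvScan, show pvHitAt [] = false from by decide]
  | cons c rest ih =>
    simp only [pvScan, Bool.or_eq_true, ih]
    constructor
    · rintro (h | ⟨j, hj⟩)
      · exact ⟨0, h⟩
      · exact ⟨j + 1, by simpa using hj⟩
    · rintro ⟨j, hj⟩
      cases j with
      | zero => exact Or.inl (by simpa using hj)
      | succ k => exact Or.inr ⟨k, by simpa using hj⟩

-- containment of a redundant ("m."-prefixed) literal implies containment of its suffix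
lemma pv_absorb {p m : List Char} (h : p <:+: m) (cs : List Char)
    (hm : PySem.Chars.isIn m cs = true) : PySem.Chars.isIn p cs = true := by
  rw [PySem.Chars.isIn_iff_infix] at hm ⊢
  exact h.trans hm

lemma pv_isIn_iff_exists (p cs : List Char) :
    PySem.Chars.isIn p cs = true ↔ ∃ j, p <+: cs.drop j :=
  (PySem.Chars.exists_prefix_drop_iff_isIn p cs).symm

theorem is_vk_url_spec : Claim_equal_is_vk_url := by
  intro url _h
  show is_vk_url url = is_vk_url_alt url
  rw [Bool.eq_iff_iff]
  have hA : is_vk_url url = true ↔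
      (PySem.Chars.isIn (pvVK ++ pvCOM ++ pvVIDEO) (PySem.Str.lower url).toList = true ∨
       PySem.Chars.isIn (pvVK ++ pvCOM ++ pvCLIP) (PySem.Str.lower url).toList = true ∨
       PySem.Chars.isIn (pvVK ++ pvRU ++ pvVIDEO) (PySem.Str.lower url).toList = true ∨
       PySem.Chars.isIn (pvVK ++ pvRU ++ pvCLIP) (PySem.Str.lower url).toList = true) := by
    simp only [is_vk_url, List.any_cons, List.any_nil, Bool.or_eq_true, Bool.or_false]
    have e1 : "vk.com/video".toList = pvVK ++ pvCOM ++ pvVIDEO := rfl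
    have e2 : "vk.com/clip".toList = pvVK ++ pvCOM ++ pvCLIP := rfl
    have e3 : "vk.ru/video".toList = pvVK ++ pvRU ++ pvVIDEO := rfl
    have e4 : "vk.ru/clip".toList = pvVK ++ pvRU ++ pvCLIP := rfl
    simp only [PySem.Str.isIn_eq, e1, e2, e3, e4]
    constructor
    · rintro (h | h | h | h | h | h)
      · exact Or.inl h
      · exact Or.inr (Or.inl h)
      · exact Or.inr (Or.inr (Or.inl h))
      · exact Or.inr (Or.inr (Or.inr h))
      · exact Or.inl (pv_absorb (by decide) _ h)
      · exact Or.inr (Or.inr (Or.inl (pv_absorb (by decide) _ h)))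
    · rintro (h | h | h | h)
      · exact Or.inl h
      · exact Or.inr (Or.inl h)
      · exact Or.inr (Or.inr (Or.inl h))
      · exact Or.inr (Or.inr (Or.inr (Or.inl h)))
  rw [hA]
  show _ ↔ pvScan (PySem.Str.lower url).toList = true
  rw [pvScan_iff]
  simp only [pvHitAt_iff, pv_isIn_iff_exists]
  constructor
  · rintro (⟨j, h⟩ | ⟨j, h⟩ | ⟨j, h⟩ | ⟨j, h⟩)
    · exact ⟨j, Or.inl h⟩
    · exact ⟨j, Or.inr (Or.inl h)⟩
    · exact ⟨j, Or.inr (Or.inr (Or.inl h))⟩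
    · exact ⟨j, Or.inr (Or.inr (Or.inr h))⟩
  · rintro ⟨j, (h | h | h | h)⟩
    · exact Or.inl ⟨j, h⟩
    · exact Or.inr (Or.inl ⟨j, h⟩)
    · exact Or.inr (Or.inr (Or.inl ⟨j, h⟩))
    · exact Or.inr (Or.inr (Or.inr ⟨j, h⟩))
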